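-- pv_equiv track=rewrite | github.com/masaki-takeda/dld | dld/HO-ROI1.py | map_region_to_category
-- ===== SOURCE A (Python) =====
-- def map_region_to_category(region_name):
--     if any(area in region_name for area in ['Temporal', 'MTG', 'STG', 'ITG', 'TP', 'Heschl', 'TPO']):
--         return 'Temporal'
--
--     elif any(area in region_name for area in ['Occipital', 'LOC', 'TOF', 'Visual', 'Lingual', 'Cuneal', 'Calcarine']):
--         return 'Occipital'
--
--     elif any(area in region_name for area in ['Frontal', 'IFG', 'MFG', 'SFG', 'OFC', 'Precentral']):
--         return 'Frontal'
--
--     elif any(area in region_name for area in ['Parietal', 'SPL', 'IPL', 'SMG', 'Angular', 'Postcentral']):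
--         return 'Parietal'
--
--     elif any(area in region_name for area in ['Cingulate', 'Paracingulate', 'Insular', 'Insula']):
--         return 'Limbic'
--
--     elif any(area in region_name for area in ['Putamen', 'Caudate', 'Thalamus', 'Pallidum', 'Accumbens', 'Amygdala']):
--         return 'Subcortical'
--
--     elif 'Cerebellum' in region_name:
--         return 'Cerebellum'
--
--     elif 'Brain-Stem' in region_name:
--         return 'Brain-Stem'
--
--     elif 'Cortical' in region_name:
--         return 'Cortical-Other'
--
--     else:
--         return 'Other'
-- ===== SOURCE B (Python) =====
-- CATEGORIES = ['Temporal', 'Occipital', 'Frontal', 'Parietal', 'Limbic',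
--               'Subcortical', 'Cerebellum', 'Brain-Stem', 'Cortical-Other']
--
-- KEYWORD_PRIORITY = {
--     'Temporal': 0, 'MTG': 0, 'STG': 0, 'ITG': 0, 'TP': 0, 'Heschl': 0, 'TPO': 0,
--     'Occipital': 1, 'LOC': 1, 'TOF': 1, 'Visual': 1, 'Lingual': 1, 'Cuneal': 1, 'Calcarine': 1,
--     'Frontal': 2, 'IFG': 2, 'MFG': 2, 'SFG': 2, 'OFC': 2, 'Precentral': 2,
--     'Parietal': 3, 'SPL': 3, 'IPL': 3, 'SMG': 3, 'Angular': 3, 'Postcentral': 3,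
--     'Cingulate': 4, 'Paracingulate': 4, 'Insular': 4, 'Insula': 4,
--     'Putamen': 5, 'Caudate': 5, 'Thalamus': 5, 'Pallidum': 5, 'Accumbens': 5, 'Amygdala': 5,
--     'Cerebellum': 6,
--     'Brain-Stem': 7,
--     'Cortical': 8,
-- }
--
-- def map_region_to_category(region_name):
--     best = None
--     for kw, pri in KEYWORD_PRIORITY.items():
--         if kw in region_name and (best is None or pri < best):
--             best = pri
--     return 'Other' if best is None else CATEGORIES[best]
-- ===== Notes on version B (the rewrite author's own statement) =====
-- stated objective: alternative
-- what changed: Replaced the nine if/elif category branches with a flat keyword-to-priority map scanned once while tracking the minimum matching priority, which then indexes a category array; no branch chain or early return remains.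
import Mathlib
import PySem

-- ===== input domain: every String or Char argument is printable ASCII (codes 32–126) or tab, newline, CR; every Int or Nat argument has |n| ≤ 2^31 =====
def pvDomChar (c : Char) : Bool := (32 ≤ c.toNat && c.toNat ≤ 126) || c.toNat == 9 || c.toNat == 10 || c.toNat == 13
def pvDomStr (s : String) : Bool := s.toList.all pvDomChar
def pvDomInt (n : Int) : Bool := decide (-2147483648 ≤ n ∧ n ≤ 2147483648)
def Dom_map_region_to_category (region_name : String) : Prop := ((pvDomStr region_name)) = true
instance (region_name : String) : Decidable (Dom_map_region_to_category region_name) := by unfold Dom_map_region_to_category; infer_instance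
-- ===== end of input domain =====

-- ===== PORT A =====
-- B replaces the nine if/elif branches by a flat keyword→priority map scanned with a
-- running minimum that then indexes a category array; proved equal to A on Dom.
def map_region_to_category (region_name : String) : String :=
  if ["Temporal", "MTG", "STG", "ITG", "TP", "Heschl", "TPO"].any
      (fun area => PySem.Str.isIn area region_name) then "Temporal"
  else if ["Occipital", "LOC", "TOF", "Visual", "Lingual", "Cuneal", "Calcarine"].any
      (fun area => PySem.Str.isIn area region_name) then "Occipital"
  else if ["Frontal", "IFG", "MFG", "SFG", "OFC", "Precentral"].any
      (fun area => PySem.Str.isIn area region_name) then "Frontal"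
  else if ["Parietal", "SPL", "IPL", "SMG", "Angular", "Postcentral"].any
      (fun area => PySem.Str.isIn area region_name) then "Parietal"
  else if ["Cingulate", "Paracingulate", "Insular", "Insula"].any
      (fun area => PySem.Str.isIn area region_name) then "Limbic"
  else if ["Putamen", "Caudate", "Thalamus", "Pallidum", "Accumbens", "Amygdala"].any
      (fun area => PySem.Str.isIn area region_name) then "Subcortical"
  else if PySem.Str.isIn "Cerebellum" region_name then "Cerebellum"
  else if PySem.Str.isIn "Brain-Stem" region_name then "Brain-Stem"
  else if PySem.Str.isIn "Cortical" region_name then "Cortical-Other"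
  else "Other"

-- ===== PORT B =====
def categories : List String :=
  ["Temporal", "Occipital", "Frontal", "Parietal", "Limbic",
   "Subcortical", "Cerebellum", "Brain-Stem", "Cortical-Other"]

def keywordPriority : List (String × Int) :=
  [("Temporal", 0), ("MTG", 0), ("STG", 0), ("ITG", 0), ("TP", 0), ("Heschl", 0), ("TPO", 0),
   ("Occipital", 1), ("LOC", 1), ("TOF", 1), ("Visual", 1), ("Lingual", 1), ("Cuneal", 1), ("Calcarine", 1),
   ("Frontal", 2), ("IFG", 2), ("MFG", 2), ("SFG", 2), ("OFC", 2), ("Precentral", 2),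
   ("Parietal", 3), ("SPL", 3), ("IPL", 3), ("SMG", 3), ("Angular", 3), ("Postcentral", 3),
   ("Cingulate", 4), ("Paracingulate", 4), ("Insular", 4), ("Insula", 4),
   ("Putamen", 5), ("Caudate", 5), ("Thalamus", 5), ("Pallidum", 5), ("Accumbens", 5), ("Amygdala", 5),
   ("Cerebellum", 6),
   ("Brain-Stem", 7),
   ("Cortical", 8)]

-- one step of the loop: update the running minimum priority
def bestStep (region_name : String) (best : Option Int) (p : String × Int) : Option Int :=
  if PySem.Str.isIn p.1 region_name then
    match best with
    | none => some p.2
    | some b => if p.2 < b then some p.2 else some b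
  else best

def map_region_to_category_alt (region_name : String) : String :=
  match keywordPriority.foldl (bestStep region_name) none with
  | none => "Other"
  | some b => (PySem.List.pyGet? categories b).getD ""   -- CATEGORIES[best]; b ∈ [0,8] so always some

-- ===== PRECONDITION & SPEC =====
def Spec_map_region_to_category (region_name : String) (out : String) : Prop := out = map_region_to_category_alt region_name
instance (region_name : String) (out : String) : Decidable (Spec_map_region_to_category region_name out) := by unfold Spec_map_region_to_category; infer_instance

-- ===== CLAIM (what is proved, stated in full; the proofs are below) =====
def Claim_equal_map_region_to_category : Prop := ∀ (region_name : String), Dom_map_region_to_category region_name → Spec_map_region_to_category region_name (map_region_to_category region_name)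

-- ===== LEMMAS AND PROOFS =====

-- the table as rows of keywords (kept abstract for the induction)
def flattenRows (rows : List (List String)) (n : Int) : List (String × Int) :=
  match rows with
  | [] => []
  | r :: rest => r.map (fun kw => (kw, n)) ++ flattenRows rest (n + 1)

-- first matching row index, starting at n (the if/elif chain, abstractly)
def firstRow (s : String) (rows : List (List String)) (n : Int) : Option Int :=
  match rows with
  | [] => none
  | r :: rest => if r.any (fun kw => PySem.Str.isIn kw s) then some n else firstRow s rest (n + 1)

lemma mem_flattenRows_le {rows : List (List String)} {n : Int} {p : String × Int}
    (hp : p ∈ flattenRows rows n) : n ≤ p.2 := by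
  induction rows generalizing n with
  | nil => simp [flattenRows] at hp
  | cons r rest ih =>
    simp only [flattenRows, List.mem_append, List.mem_map] at hp
    rcases hp with ⟨kw, _, rfl⟩ | h
    · exact le_refl n
    · have := ih h; omega

lemma foldl_skip (s : String) (L : List (String × Int)) (best : Option Int)
    (h : ∀ p ∈ L, PySem.Str.isIn p.1 s = false) :
    L.foldl (bestStep s) best = best := by
  induction L generalizing best with
  | nil => rfl
  | cons p rest ih =>
    simp only [List.foldl_cons, bestStep, h p (by simp)]
    exact ih best (fun q hq => h q (by simp [hq]))

lemma foldl_absorb (s : String) (L : List (String × Int)) (j : Int)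
    (h : ∀ p ∈ L, j ≤ p.2) :
    L.foldl (bestStep s) (some j) = some j := by
  induction L with
  | nil => rfl
  | cons p rest ih =>
    have hj := h p (by simp)
    have : bestStep s (some j) p = some j := by
      simp only [bestStep]
      split_ifs with h1 h2 <;> first | rfl | omega
    rw [List.foldl_cons, this]
    exact ih (fun q hq => h q (by simp [hq]))

lemma foldl_hit (s : String) (L : List (String × Int)) (i : Int)
    (hall : ∀ p ∈ L, p.2 = i)
    (hmatch : ∃ p ∈ L, PySem.Str.isIn p.1 s = true) :
    L.foldl (bestStep s) none = some i := by
  induction L with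
  | nil => simp at hmatch
  | cons p rest ih =>
    by_cases hp : PySem.Str.isIn p.1 s = true
    · rw [List.foldl_cons]
      have : bestStep s none p = some i := by
        unfold bestStep; rw [if_pos hp, hall p (by simp)]
      rw [this]
      exact foldl_absorb s rest i (fun q hq => le_of_eq (hall q (by simp [hq])).symm)
    · rw [List.foldl_cons]
      have : bestStep s none p = none := by
        unfold bestStep; rw [if_neg hp]
      rw [this]
      rcases hmatch with ⟨q, hq, hqm⟩
      rcases List.mem_cons.mp hq with rfl | hq'
      · exact absurd hqm hp
      · exact ih (fun q hq => hall q (by simp [hq])) ⟨q, hq', hqm⟩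

-- the running-minimum fold over the flattened table equals the first-matching-row index
lemma foldl_flatten_eq_firstRow (s : String) (rows : List (List String)) (n : Int) :
    (flattenRows rows n).foldl (bestStep s) none = firstRow s rows n := by
  induction rows generalizing n with
  | nil => rfl
  | cons r rest ih =>
    rw [flattenRows, List.foldl_append, firstRow]
    by_cases hr : r.any (fun kw => PySem.Str.isIn kw s) = true
    · rcases List.any_eq_true.mp hr with ⟨kw, hkw, hm⟩
      rw [foldl_hit s _ n (by simp) ⟨(kw, n), by simp [List.mem_map]; exact hkw, hm⟩]
      rw [if_pos hr]
      exact foldl_absorb s _ n (fun p hp => by have := mem_flattenRows_le hp; omega)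
    · rw [foldl_skip s _ none (by
        intro p hp
        simp only [List.mem_map] at hp
        rcases hp with ⟨kw, hkw, rfl⟩
        exact Bool.eq_false_iff.mpr (fun hc => hr (List.any_eq_true.mpr ⟨kw, hkw, hc⟩)))]
      rw [if_neg hr]
      exact ih (n + 1)

def tableRows : List (List String) :=
  [["Temporal", "MTG", "STG", "ITG", "TP", "Heschl", "TPO"],
   ["Occipital", "LOC", "TOF", "Visual", "Lingual", "Cuneal", "Calcarine"],
   ["Frontal", "IFG", "MFG", "SFG", "OFC", "Precentral"],
   ["Parietal", "SPL", "IPL", "SMG", "Angular", "Postcentral"],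
   ["Cingulate", "Paracingulate", "Insular", "Insula"],
   ["Putamen", "Caudate", "Thalamus", "Pallidum", "Accumbens", "Amygdala"],
   ["Cerebellum"],
   ["Brain-Stem"],
   ["Cortical"]]

lemma keywordPriority_eq_flatten : keywordPriority = flattenRows tableRows 0 := by
  decide

-- ===== VERDICT (by name: the statement is the Claim_ definition above) =====
theorem map_region_to_category_spec : Claim_equal_map_region_to_category := by
  intro s _
  unfold Spec_map_region_to_category map_region_to_category_alt
  rw [keywordPriority_eq_flatten, foldl_flatten_eq_firstRow]
  unfold map_region_to_category
  simp only [tableRows, firstRow, List.any_cons, List.any_nil, Bool.or_false]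
  split_ifs <;> rfl
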